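-- pv_equiv track=rewrite | github.com/Yujun-Won/Algorithm | 프로그래머스/unrated/138477. 명예의 전당 （1）/명예의 전당 （1）.py | solution
-- ===== SOURCE A (Python) =====
-- def solution(k, score):
--     answer = []
--     result = []
--
--     for i in score:
--         if len(answer) < 3:
--             answer.append(i)
--             answer = sorted(answer, reverse=True)
--             result.append(answer[-1])
--         else:
--             temp = answer.pop()
--             if i < temp:
--                 answer.append(temp)
--                 pass
--             else:
--                 answer.append(i)
--                 answer = sorted(answer, reverse=True)
--                 result.append(answer[-1])
--
--     return result
-- ===== SOURCE B (Python) =====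
-- def solution(k, score):
--     # Stateless staged recomputation: for each position decide from the raw prefix
--     # whether an entry is emitted (first three scores always; later ones only when
--     # not below the 3rd-highest of the strictly preceding scores), and emit the
--     # 3rd-highest (or lowest, while fewer than three) of the prefix including it.
--     result = []
--     for i, s in enumerate(score):
--         if i < 3 or s >= sorted(score[:i], reverse=True)[2]:
--             result.append(sorted(score[:i + 1], reverse=True)[:3][-1])
--     return result
-- ===== Notes on version B (the rewrite author's own statement) =====
-- stated objective: alternative
-- what changed: B carries no running state at all: instead of A's mutated top-3 list that is sorted, popped and re-sorted across iterations, B recomputes each answer from scratch from the raw prefix score[:i+1] (emit when i < 3 or the score is not below the 3rd-highest of score[:i], and emit the min of the top three of the prefix), trading A's O(n) single pass for a stateless O(n^2 log n) staged recomputation.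
import Mathlib
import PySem

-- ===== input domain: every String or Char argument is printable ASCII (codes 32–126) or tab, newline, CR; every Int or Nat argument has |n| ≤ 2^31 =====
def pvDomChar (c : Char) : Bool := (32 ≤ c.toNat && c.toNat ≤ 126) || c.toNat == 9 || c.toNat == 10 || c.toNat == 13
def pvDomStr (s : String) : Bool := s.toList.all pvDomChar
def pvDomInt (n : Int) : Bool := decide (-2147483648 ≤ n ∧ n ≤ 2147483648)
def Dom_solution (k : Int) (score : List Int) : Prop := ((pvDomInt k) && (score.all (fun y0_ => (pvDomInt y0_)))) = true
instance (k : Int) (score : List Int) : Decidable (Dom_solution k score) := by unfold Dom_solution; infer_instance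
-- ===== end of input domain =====

-- B is a stateless staged recomputation: each emitted entry is recomputed from the raw
-- prefix of the scores instead of A's running, mutated top-3 list (objective: alternative).

-- ===== PORT A =====
-- one iteration of A's for-loop; state = (answer, result)
def solutionStepA (st : List Int × List Int) (i : Int) : List Int × List Int :=
  let answer := st.1
  let result := st.2
  if answer.length < 3 then
    let answer' := PySem.List.sorted (answer ++ [i]) (fun x => x) true
    (answer', result ++ [PySem.List.pyGetD answer' (-1) 0])
  else
    match PySem.List.pop? answer (-1) with
    | none => (answer, result)  -- unreachable: this branch has answer.length ≥ 3
    | some (temp, rest) =>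
      if i < temp then (rest ++ [temp], result)
      else
        let answer' := PySem.List.sorted (rest ++ [i]) (fun x => x) true
        (answer', result ++ [PySem.List.pyGetD answer' (-1) 0])

def solution (k : Int) (score : List Int) : List Int :=
  (score.foldl solutionStepA ([], [])).2

-- ===== PORT B =====
-- one iteration of B's for-loop over enumerate(score); res is the result accumulator
def solutionStepB (score : List Int) (res : List Int) (is : Int × Int) : List Int :=
  let i := is.1
  let s := is.2
  -- 'i < 3 or s >= sorted(score[:i], reverse=True)[2]' with Python's short-circuit
  let fire : Bool :=
    if i < 3 then true
    else
      match PySem.List.pyGet? (PySem.List.sorted (PySem.List.slice score none (some i)) (fun x => x) true) 2 with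
      | some t => decide (t ≤ s)
      | none => false  -- unreachable: reached only with i ≥ 3, so score[:i] has ≥ 3 elements
  if fire then
    res ++ [PySem.List.pyGetD
      (PySem.List.slice (PySem.List.sorted (PySem.List.slice score none (some (i + 1))) (fun x => x) true) none (some 3))
      (-1) 0]
  else res

def solution_alt (k : Int) (score : List Int) : List Int :=
  (PySem.List.enumerate score 0).foldl (solutionStepB score) []

-- ===== PRECONDITION & SPEC =====
def Spec_solution (k : Int) (score : List Int) (out : List Int) : Prop := out = solution_alt k score
instance (k : Int) (score : List Int) (out : List Int) : Decidable (Spec_solution k score out) := by unfold Spec_solution; infer_instance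

-- ===== CLAIM (what is proved, stated in full; the proofs are below) =====
def Claim_equal_solution : Prop := ∀ (k : Int) (score : List Int), Dom_solution k score → Spec_solution k score (solution k score)

-- ===== LEMMAS AND PROOFS =====

-- a descending rearrangement of xs IS sorted(xs, reverse=True) (Int values, so ties are harmless)
lemma sortedRevEq (xs ys : List Int) (hp : ys.Perm xs) (hs : ys.Pairwise (· ≥ ·)) :
    PySem.List.sorted xs (fun x => x) true = ys := by
  apply PySem.List.eq_of_perm_of_pairwise_le_of_injective (fun x : Int => -x) neg_injective
  · exact (PySem.List.sorted_perm xs (fun x => x) true).trans hp.symm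
  · have := PySem.List.sorted_pairwise_rev (xs := xs) (key := fun x : Int => x)
    exact this.imp (by intro a b h; simpa using h)
  · exact hs.imp (by intro a b h; simpa using h)

lemma sortedRevPairwise (xs : List Int) :
    (PySem.List.sorted xs (fun x => x) true).Pairwise (· ≥ ·) :=
  (PySem.List.sorted_pairwise_rev (xs := xs) (key := fun x : Int => x)).imp
    (by intro a b h; simpa using h)

-- sorting ignores the arrangement of the input (Int values)
lemma sortedRevCongr (xs ys : List Int) (h : xs.Perm ys) :
    PySem.List.sorted xs (fun x => x) true = PySem.List.sorted ys (fun x => x) true :=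
  sortedRevEq xs _ ((PySem.List.sorted_perm ys (fun x => x) true).trans h.symm)
    (sortedRevPairwise ys)

-- xs[:3] with the slice primitive is List.take 3
lemma sliceTake3 (xs : List Int) :
    PySem.List.slice xs none (some 3) = xs.take 3 := by
  have := PySem.List.slice_to xs (b := 3) (by omega)
  simpa using this

-- score[:i+1] at the Int index ↑n + 1
lemma sliceTakeSucc (xs : List Int) (n : Nat) :
    PySem.List.slice xs none (some ((n : Int) + 1)) = xs.take (n + 1) := by
  have := PySem.List.slice_to xs (b := (n : Int) + 1) (by omega)
  rw [this]; norm_num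

-- the invariant tying A's 'answer' to the position n: answer is the (descending) top three
-- of the prefix score[:n], with its explicit shape
def InvA (score : List Int) (n : Nat) (ans : List Int) : Prop :=
  ans = (PySem.List.sorted (score.take n) (fun x => x) true).take 3 ∧
  ((n = 0 ∧ ans = []) ∨
   (n = 1 ∧ ∃ x, ans = [x]) ∨
   (n = 2 ∧ ∃ x y, x ≥ y ∧ ans = [x, y]) ∨
   (3 ≤ n ∧ ∃ x y z, x ≥ y ∧ y ≥ z ∧ ans = [x, y, z]))

set_option maxHeartbeats 4000000 in
lemma loop_eq (score : List Int) : ∀ (rest : List Int) (n : Nat) (ans res : List Int),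
    score.drop n = rest → InvA score n ans →
    (rest.foldl solutionStepA (ans, res)).2
      = (PySem.List.enumerate rest (n : Int)).foldl (solutionStepB score) res := by
  intro rest
  induction rest with
  | nil => intro n ans res _ _; rfl
  | cons s tail ih =>
    intro n ans res hdrop hinv
    have hn : n < score.length := by
      by_contra h
      push_neg at h
      rw [List.drop_eq_nil_of_le h] at hdrop
      simp at hdrop
    have hgetn : score[n]? = some s := by
      have h0 : (score.drop n)[0]? = some s := by rw [hdrop]; rfl
      simpa [List.getElem?_drop] using h0
    have htake : score.take (n + 1) = score.take n ++ [s] := by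
      rw [List.take_add_one, hgetn]; rfl
    have hdrop' : score.drop (n + 1) = tail := by
      have : (score.drop n).drop 1 = score.drop (n + 1) := by
        rw [List.drop_drop]
      rw [← this, hdrop]; rfl
    have hcast : (n : Int) + 1 = ((n + 1 : Nat) : Int) := by push_cast; ring
    simp only [List.foldl_cons, PySem.List.enumerate_cons]
    obtain ⟨hEq, hshape⟩ := hinv
    rcases hshape with ⟨hn0, hansnil⟩ | ⟨hn1, x, hans⟩ | ⟨hn2, x, y, hxy, hans⟩ |
      ⟨hn3, x, y, z, hxy, hyz, hans⟩
    · -- n = 0 : answer is empty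
      subst hansnil
      have hnew : PySem.List.sorted (score.take (n + 1)) (fun x => x) true = [s] := by
        rw [htake]
        have hp0 : score.take n = [] := by rw [hn0]; simp
        rw [hp0]
        exact sortedRevEq _ _ (by simp) (by simp)
      have hs0 : PySem.List.sorted [s] (fun x => x) true = [s] :=
        sortedRevEq _ _ (by simp) (by simp)
      have hA : solutionStepA ([], res) s = ([s], res ++ [s]) := by
        simp [solutionStepA, hs0, PySem.List.pyGetD, PySem.List.pyGet?_neg_one]
      have hi : ((n : Int)) < 3 := by omega
      have hv : PySem.List.pyGetD
          (PySem.List.slice (PySem.List.sorted (PySem.List.slice score none (some ((n : Int) + 1))) (fun x => x) true) none (some 3))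
          (-1) (0 : Int) = s := by
        rw [sliceTakeSucc, hnew, sliceTake3]; simp [PySem.List.pyGetD, PySem.List.pyGet?, PySem.List.pyIdx?]
      have hB : solutionStepB score res ((n : Int), s) = res ++ [s] := by
        simp only [solutionStepB]
        simp [hi, hv]
      rw [hA, hB, hcast]
      exact ih (n + 1) [s] (res ++ [s]) hdrop' ⟨by simp [hnew], Or.inr (Or.inl ⟨by omega, s, rfl⟩)⟩
    · -- n = 1 : answer = [x]
      subst hans
      have hlen1 : (score.take n).length = n := by rw [List.length_take]; omega
      have htk3 : (PySem.List.sorted (score.take n) (fun x => x) true).take 3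
          = PySem.List.sorted (score.take n) (fun x => x) true := by
        apply List.take_of_length_le
        rw [(PySem.List.sorted_perm _ _ _).length_eq, hlen1]; omega
      have hansperm : ([x] : List Int).Perm (score.take n) := by
        rw [hEq, htk3]; exact PySem.List.sorted_perm _ _ _
      have hstep : PySem.List.sorted (score.take (n + 1)) (fun x => x) true
          = PySem.List.sorted ([x] ++ [s]) (fun x => x) true := by
        rw [htake]
        exact sortedRevCongr _ _ (hansperm.append_right [s]).symm
      have hi : ((n : Int)) < 3 := by omega
      by_cases h1 : x < s
      · have hsx : PySem.List.sorted [x, s] (fun x => x) true = [s, x] :=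
          sortedRevEq _ _ (List.Perm.swap x s []) (by simp; omega)
        have hnew : PySem.List.sorted (score.take (n + 1)) (fun x => x) true = [s, x] :=
          hstep.trans hsx
        have hA : solutionStepA ([x], res) s = ([s, x], res ++ [x]) := by
          simp [solutionStepA, hsx, PySem.List.pyGetD, PySem.List.pyGet?_neg_one]
        have hv : PySem.List.pyGetD
            (PySem.List.slice (PySem.List.sorted (PySem.List.slice score none (some ((n : Int) + 1))) (fun x => x) true) none (some 3))
            (-1) (0 : Int) = x := by
          rw [sliceTakeSucc, hnew, sliceTake3]; simp [PySem.List.pyGetD, PySem.List.pyGet?, PySem.List.pyIdx?]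
        have hB : solutionStepB score res ((n : Int), s) = res ++ [x] := by
          simp only [solutionStepB]
          simp [hi, hv]
        rw [hA, hB, hcast]
        exact ih (n + 1) [s, x] (res ++ [x]) hdrop'
          ⟨by simp [hnew], Or.inr (Or.inr (Or.inl ⟨by omega, s, x, by omega, rfl⟩))⟩
      · have hsx : PySem.List.sorted [x, s] (fun x => x) true = [x, s] :=
          sortedRevEq _ _ (by simp) (by simp; omega)
        have hnew : PySem.List.sorted (score.take (n + 1)) (fun x => x) true = [x, s] :=
          hstep.trans hsx
        have hA : solutionStepA ([x], res) s = ([x, s], res ++ [s]) := by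
          simp [solutionStepA, hsx, PySem.List.pyGetD, PySem.List.pyGet?_neg_one]
        have hv : PySem.List.pyGetD
            (PySem.List.slice (PySem.List.sorted (PySem.List.slice score none (some ((n : Int) + 1))) (fun x => x) true) none (some 3))
            (-1) (0 : Int) = s := by
          rw [sliceTakeSucc, hnew, sliceTake3]; simp [PySem.List.pyGetD, PySem.List.pyGet?, PySem.List.pyIdx?]
        have hB : solutionStepB score res ((n : Int), s) = res ++ [s] := by
          simp only [solutionStepB]
          simp [hi, hv]
        rw [hA, hB, hcast]
        exact ih (n + 1) [x, s] (res ++ [s]) hdrop'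
          ⟨by simp [hnew], Or.inr (Or.inr (Or.inl ⟨by omega, x, s, by omega, rfl⟩))⟩
    · -- n = 2 : answer = [x, y] with x ≥ y
      subst hans
      have hlen1 : (score.take n).length = n := by rw [List.length_take]; omega
      have htk3 : (PySem.List.sorted (score.take n) (fun x => x) true).take 3
          = PySem.List.sorted (score.take n) (fun x => x) true := by
        apply List.take_of_length_le
        rw [(PySem.List.sorted_perm _ _ _).length_eq, hlen1]; omega
      have hansperm : ([x, y] : List Int).Perm (score.take n) := by
        rw [hEq, htk3]; exact PySem.List.sorted_perm _ _ _
      have hstep : PySem.List.sorted (score.take (n + 1)) (fun x => x) true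
          = PySem.List.sorted ([x, y] ++ [s]) (fun x => x) true := by
        rw [htake]
        exact sortedRevCongr _ _ (hansperm.append_right [s]).symm
      have hi : ((n : Int)) < 3 := by omega
      by_cases h1 : x < s
      · have hsx : PySem.List.sorted [x, y, s] (fun x => x) true = [s, x, y] :=
          sortedRevEq _ _ (List.perm_append_comm (l₁ := [s]) (l₂ := [x, y])) (by simp; omega)
        have hnew : PySem.List.sorted (score.take (n + 1)) (fun x => x) true = [s, x, y] :=
          hstep.trans hsx
        have hA : solutionStepA ([x, y], res) s = ([s, x, y], res ++ [y]) := by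
          simp [solutionStepA, hsx, PySem.List.pyGetD, PySem.List.pyGet?_neg_one]
        have hv : PySem.List.pyGetD
            (PySem.List.slice (PySem.List.sorted (PySem.List.slice score none (some ((n : Int) + 1))) (fun x => x) true) none (some 3))
            (-1) (0 : Int) = y := by
          rw [sliceTakeSucc, hnew, sliceTake3]; simp [PySem.List.pyGetD, PySem.List.pyGet?, PySem.List.pyIdx?]
        have hB : solutionStepB score res ((n : Int), s) = res ++ [y] := by
          simp only [solutionStepB]
          simp [hi, hv]
        rw [hA, hB, hcast]
        exact ih (n + 1) [s, x, y] (res ++ [y]) hdrop'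
          ⟨by simp [hnew], Or.inr (Or.inr (Or.inr ⟨by omega, s, x, y, by omega, hxy, rfl⟩))⟩
      · by_cases h2 : y < s
        · have hsx : PySem.List.sorted [x, y, s] (fun x => x) true = [x, s, y] :=
            sortedRevEq _ _ ((List.Perm.swap y s []).cons x) (by simp; omega)
          have hnew : PySem.List.sorted (score.take (n + 1)) (fun x => x) true = [x, s, y] :=
            hstep.trans hsx
          have hA : solutionStepA ([x, y], res) s = ([x, s, y], res ++ [y]) := by
            simp [solutionStepA, hsx, PySem.List.pyGetD, PySem.List.pyGet?_neg_one]
          have hv : PySem.List.pyGetD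
              (PySem.List.slice (PySem.List.sorted (PySem.List.slice score none (some ((n : Int) + 1))) (fun x => x) true) none (some 3))
              (-1) (0 : Int) = y := by
            rw [sliceTakeSucc, hnew, sliceTake3]; simp [PySem.List.pyGetD, PySem.List.pyGet?, PySem.List.pyIdx?]
          have hB : solutionStepB score res ((n : Int), s) = res ++ [y] := by
            simp only [solutionStepB]
            simp [hi, hv]
          rw [hA, hB, hcast]
          exact ih (n + 1) [x, s, y] (res ++ [y]) hdrop'
            ⟨by simp [hnew], Or.inr (Or.inr (Or.inr ⟨by omega, x, s, y, by omega, by omega, rfl⟩))⟩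
        · have hsx : PySem.List.sorted [x, y, s] (fun x => x) true = [x, y, s] :=
            sortedRevEq _ _ (by simp) (by simp; omega)
          have hnew : PySem.List.sorted (score.take (n + 1)) (fun x => x) true = [x, y, s] :=
            hstep.trans hsx
          have hA : solutionStepA ([x, y], res) s = ([x, y, s], res ++ [s]) := by
            simp [solutionStepA, hsx, PySem.List.pyGetD, PySem.List.pyGet?_neg_one]
          have hv : PySem.List.pyGetD
              (PySem.List.slice (PySem.List.sorted (PySem.List.slice score none (some ((n : Int) + 1))) (fun x => x) true) none (some 3))
              (-1) (0 : Int) = s := by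
            rw [sliceTakeSucc, hnew, sliceTake3]; simp [PySem.List.pyGetD, PySem.List.pyGet?, PySem.List.pyIdx?]
          have hB : solutionStepB score res ((n : Int), s) = res ++ [s] := by
            simp only [solutionStepB]
            simp [hi, hv]
          rw [hA, hB, hcast]
          exact ih (n + 1) [x, y, s] (res ++ [s]) hdrop'
            ⟨by simp [hnew], Or.inr (Or.inr (Or.inr ⟨by omega, x, y, s, hxy, by omega, rfl⟩))⟩
    · -- 3 ≤ n : answer = [x, y, z] full
      subst hans
      have hsplit : PySem.List.sorted (score.take n) (fun x => x) true
          = x :: y :: z :: (PySem.List.sorted (score.take n) (fun x => x) true).drop 3 := by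
        conv_lhs => rw [← List.take_append_drop 3 (PySem.List.sorted (score.take n) (fun x => x) true)]
        rw [← hEq]; rfl
      set t := (PySem.List.sorted (score.take n) (fun x => x) true).drop 3 with htdef
      have hpermp : (x :: y :: z :: t).Perm (score.take n) := by
        rw [← hsplit]; exact PySem.List.sorted_perm _ _ _
      have hpw : (x :: y :: z :: t).Pairwise (· ≥ ·) := by
        rw [← hsplit]; exact sortedRevPairwise _
      have hx_all : ∀ a ∈ (y :: z :: t), x ≥ a := (List.pairwise_cons.mp hpw).1
      have hy_all : ∀ a ∈ (z :: t), y ≥ a :=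
        (List.pairwise_cons.mp (List.pairwise_cons.mp hpw).2).1
      have htz : ∀ a ∈ t, a ≤ z := by
        intro a ha
        exact (List.pairwise_cons.mp (List.pairwise_cons.mp (List.pairwise_cons.mp hpw).2).2).1 a ha
      have hpwt : t.Pairwise (· ≥ ·) :=
        (List.pairwise_cons.mp (List.pairwise_cons.mp (List.pairwise_cons.mp hpw).2).2).2
      have hpop : PySem.List.pop? [x, y, z] (-1) = some (z, [x, y]) := by
        simpa using PySem.List.pop?_last (xs := [x, y]) (x := z)
      have hi : ¬ ((n : Int) < 3) := by omega
      have hget2 : PySem.List.pyGet?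
          (PySem.List.sorted (List.take n score) (fun x => x) true) 2 = some z := by
        rw [hsplit]
        simp [pysem]
      by_cases h0 : s < z
      · -- no entry is emitted
        have hA : solutionStepA ([x, y, z], res) s = ([x, y, z], res) := by
          simp [solutionStepA, hpop, h0]
        have hB : solutionStepB score res ((n : Int), s) = res := by
          have hzs : ¬ (z ≤ s) := by omega
          simp [solutionStepB, hi, hget2, hzs]
        have hnew : PySem.List.sorted (score.take (n + 1)) (fun x => x) true
            = x :: y :: z :: PySem.List.sorted (t ++ [s]) (fun x => x) true := by
          rw [htake]
          apply sortedRevEq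
          · exact ((((PySem.List.sorted_perm (t ++ [s]) (fun x => x) true).cons z).cons y).cons
              x).trans (hpermp.append_right [s])
          · have hmem : ∀ a ∈ PySem.List.sorted (t ++ [s]) (fun x => x) true, a ≤ z := by
              intro a ha
              have : a ∈ t ++ [s] :=
                ((PySem.List.sorted_perm (t ++ [s]) (fun x => x) true).mem_iff).mp ha
              rcases List.mem_append.mp this with h | h
              · exact htz a h
              · simp at h; omega
            refine List.pairwise_cons.mpr ⟨?_, List.pairwise_cons.mpr ⟨?_,
              List.pairwise_cons.mpr ⟨?_, sortedRevPairwise _⟩⟩⟩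
            · intro a ha
              simp only [List.mem_cons] at ha
              have e1 := hx_all y (by simp)
              have e2 := hx_all z (by simp)
              rcases ha with h | h | h
              · omega
              · omega
              · have := hmem a h; omega
            · intro a ha
              simp only [List.mem_cons] at ha
              have e1 := hy_all z (by simp)
              rcases ha with h | h
              · omega
              · have := hmem a h; omega
            · intro a ha
              exact hmem a ha
        rw [hA, hB, hcast]
        exact ih (n + 1) [x, y, z] res hdrop'
          ⟨by simp [hnew], Or.inr (Or.inr (Or.inr ⟨by omega, x, y, z, hxy, hyz, rfl⟩))⟩
      · have hge : z ≤ s := by omega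
        by_cases h1 : x < s
        · have hsx : PySem.List.sorted [x, y, s] (fun x => x) true = [s, x, y] :=
            sortedRevEq _ _ (List.perm_append_comm (l₁ := [s]) (l₂ := [x, y])) (by simp; omega)
          have hA : solutionStepA ([x, y, z], res) s = ([s, x, y], res ++ [y]) := by
            simp [solutionStepA, hpop, h0, hsx, PySem.List.pyGetD, PySem.List.pyGet?_neg_one]
          have hnew : PySem.List.sorted (score.take (n + 1)) (fun x => x) true
              = s :: x :: y :: z :: t := by
            rw [htake]
            apply sortedRevEq
            · exact ((List.perm_append_singleton s (x :: y :: z :: t)).symm).trans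
                (hpermp.append_right [s])
            · refine List.pairwise_cons.mpr ⟨?_, hpw⟩
              intro a ha
              simp only [List.mem_cons] at ha
              have e1 := hx_all y (by simp)
              have e2 := hx_all z (by simp)
              rcases ha with h | h | h | h
              · omega
              · omega
              · omega
              · have := htz a h; omega
          have hv : PySem.List.pyGetD
              (PySem.List.slice (PySem.List.sorted (PySem.List.slice score none (some ((n : Int) + 1))) (fun x => x) true) none (some 3))
              (-1) (0 : Int) = y := by
            rw [sliceTakeSucc, hnew, sliceTake3]; simp [PySem.List.pyGetD, PySem.List.pyGet?, PySem.List.pyIdx?]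
          have hB : solutionStepB score res ((n : Int), s) = res ++ [y] := by
            simp [solutionStepB, hi, hget2, hge, hv]
          rw [hA, hB, hcast]
          exact ih (n + 1) [s, x, y] (res ++ [y]) hdrop'
            ⟨by simp [hnew], Or.inr (Or.inr (Or.inr ⟨by omega, s, x, y, by omega, hxy, rfl⟩))⟩
        · by_cases h2 : y < s
          · have hsx : PySem.List.sorted [x, y, s] (fun x => x) true = [x, s, y] :=
              sortedRevEq _ _ ((List.Perm.swap y s []).cons x) (by simp; omega)
            have hA : solutionStepA ([x, y, z], res) s = ([x, s, y], res ++ [y]) := by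
              simp [solutionStepA, hpop, h0, hsx, PySem.List.pyGetD, PySem.List.pyGet?_neg_one]
            have hnew : PySem.List.sorted (score.take (n + 1)) (fun x => x) true
                = x :: s :: y :: z :: t := by
              rw [htake]
              apply sortedRevEq
              · exact (((List.perm_append_singleton s (y :: z :: t)).symm).cons x).trans
                  (hpermp.append_right [s])
              · refine List.pairwise_cons.mpr ⟨?_, List.pairwise_cons.mpr ⟨?_,
                  (List.pairwise_cons.mp hpw).2⟩⟩
                · intro a ha
                  simp only [List.mem_cons] at ha
                  have e1 := hx_all y (by simp)
                  have e2 := hx_all z (by simp)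
                  rcases ha with h | h | h | h
                  · omega
                  · omega
                  · omega
                  · have := htz a h; omega
                · intro a ha
                  simp only [List.mem_cons] at ha
                  have e1 := hy_all z (by simp)
                  rcases ha with h | h | h
                  · omega
                  · omega
                  · have := htz a h; omega
            have hv : PySem.List.pyGetD
                (PySem.List.slice (PySem.List.sorted (PySem.List.slice score none (some ((n : Int) + 1))) (fun x => x) true) none (some 3))
                (-1) (0 : Int) = y := by
              rw [sliceTakeSucc, hnew, sliceTake3]; simp [PySem.List.pyGetD, PySem.List.pyGet?, PySem.List.pyIdx?]
            have hB : solutionStepB score res ((n : Int), s) = res ++ [y] := by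
              simp [solutionStepB, hi, hget2, hge, hv]
            rw [hA, hB, hcast]
            exact ih (n + 1) [x, s, y] (res ++ [y]) hdrop'
              ⟨by simp [hnew], Or.inr (Or.inr (Or.inr ⟨by omega, x, s, y, by omega, by omega, rfl⟩))⟩
          · have hsx : PySem.List.sorted [x, y, s] (fun x => x) true = [x, y, s] :=
              sortedRevEq _ _ (by simp) (by simp; omega)
            have hA : solutionStepA ([x, y, z], res) s = ([x, y, s], res ++ [s]) := by
              simp [solutionStepA, hpop, h0, hsx, PySem.List.pyGetD, PySem.List.pyGet?_neg_one]
            have hnew : PySem.List.sorted (score.take (n + 1)) (fun x => x) true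
                = x :: y :: s :: z :: t := by
              rw [htake]
              apply sortedRevEq
              · exact ((((List.perm_append_singleton s (z :: t)).symm).cons y).cons x).trans
                  (hpermp.append_right [s])
              · refine List.pairwise_cons.mpr ⟨?_, List.pairwise_cons.mpr ⟨?_,
                  List.pairwise_cons.mpr ⟨?_,
                    (List.pairwise_cons.mp (List.pairwise_cons.mp hpw).2).2⟩⟩⟩
                · intro a ha
                  simp only [List.mem_cons] at ha
                  have e1 := hx_all y (by simp)
                  have e2 := hx_all z (by simp)
                  rcases ha with h | h | h | h
                  · omega
                  · omega
                  · omega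
                  · have := htz a h; omega
                · intro a ha
                  simp only [List.mem_cons] at ha
                  have e1 := hy_all z (by simp)
                  rcases ha with h | h | h
                  · omega
                  · omega
                  · have := htz a h; omega
                · intro a ha
                  simp only [List.mem_cons] at ha
                  rcases ha with h | h
                  · omega
                  · have := htz a h; omega
            have hv : PySem.List.pyGetD
                (PySem.List.slice (PySem.List.sorted (PySem.List.slice score none (some ((n : Int) + 1))) (fun x => x) true) none (some 3))
                (-1) (0 : Int) = s := by
              rw [sliceTakeSucc, hnew, sliceTake3]; simp [PySem.List.pyGetD, PySem.List.pyGet?, PySem.List.pyIdx?]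
            have hB : solutionStepB score res ((n : Int), s) = res ++ [s] := by
              simp [solutionStepB, hi, hget2, hge, hv]
            rw [hA, hB, hcast]
            exact ih (n + 1) [x, y, s] (res ++ [s]) hdrop'
              ⟨by simp [hnew], Or.inr (Or.inr (Or.inr ⟨by omega, x, y, s, hxy, by omega, rfl⟩))⟩

-- ===== VERDICT (by name: the statement is the Claim_ definition above) =====
theorem solution_spec : Claim_equal_solution := by
  intro k score _
  unfold Spec_solution solution solution_alt
  exact loop_eq score score 0 [] [] rfl ⟨rfl, Or.inl ⟨rfl, rfl⟩⟩
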